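-- pv_equiv track=rewrite | github.com/XiaoCaoAskedForHelp/LeetCode-Py | 动态规划/Solution2684矩阵中移动的最大次数.py | maxMoves2
-- ===== SOURCE A (Python) =====
-- from typing import List
--
-- def maxMoves2(grid: List[List[int]]) -> int:
--     m, n = len(grid), len(grid[0])
--     q = set(range(m))
--     for j in range(1, n):
--         q2 = set()
--         for i in q:
--             for i2 in [i - 1, i, i + 1]:
--                 if 0 <= i2 < m and grid[i][j - 1] < grid[i2][j]:
--                     q2.add(i2)
--         q = q2
--         if not q:
--             return j - 1
--     return n - 1
-- ===== SOURCE B (Python) =====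
-- def maxMoves2(grid):
--     m, n = len(grid), len(grid[0])
--     # f[i] = max number of rightward moves starting at (i, j) for the current column j
--     f = [0] * m
--     for j in reversed(range(n - 1)):
--         nf = []
--         for i in range(m):
--             best = -1
--             for i2 in (i - 1, i, i + 1):
--                 if 0 <= i2 < m and grid[i][j] < grid[i2][j + 1] and f[i2] > best:
--                     best = f[i2]
--             nf.append(best + 1)
--         f = nf
--     return max(f)
-- ===== Notes on version B (the rewrite author's own statement) =====
-- stated objective: alternative
-- what changed: A pushes a frontier set of reachable rows left-to-right and returns at the first empty column; B does bottom-up dynamic programming right-to-left, computing per row the longest strictly-increasing rightward path and returning the maximum over the first column.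
-- outside the precondition, e.g. on maxMoves2([[]]): A returns -1, B returns 0; on maxMoves2([[1, 0, 9], [1, 0], [1, 0]]): A returns 0, B raises IndexError
import Mathlib
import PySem

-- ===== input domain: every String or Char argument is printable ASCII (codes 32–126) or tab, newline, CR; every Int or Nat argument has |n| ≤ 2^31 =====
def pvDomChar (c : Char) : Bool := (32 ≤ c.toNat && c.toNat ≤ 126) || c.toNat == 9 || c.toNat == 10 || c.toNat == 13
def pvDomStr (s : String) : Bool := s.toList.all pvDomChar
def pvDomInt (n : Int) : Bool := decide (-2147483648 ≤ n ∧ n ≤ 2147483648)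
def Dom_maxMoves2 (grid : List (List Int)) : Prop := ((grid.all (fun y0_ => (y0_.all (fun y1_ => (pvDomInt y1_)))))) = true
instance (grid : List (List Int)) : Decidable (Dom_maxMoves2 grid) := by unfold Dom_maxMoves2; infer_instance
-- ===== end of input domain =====

-- B replaces A's left-to-right frontier-set scan by a right-to-left bottom-up DP over
-- longest increasing rightward paths (alternative algorithm, same asymptotic cost).


-- grid[i][j]; both Python versions only evaluate it on in-range indices (guaranteed by Pre_)
def pvCell (grid : List (List Int)) (i j : Int) : Int :=
  (PySem.List.pyGet? ((PySem.List.pyGet? grid i).getD []) j).getD 0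

-- ===== PORT A =====
-- q2 = set(); for i in q: for i2 in [i-1,i,i+1]: if 0 <= i2 < m and grid[i][j-1] < grid[i2][j]: q2.add(i2)
def pvAStep (grid : List (List Int)) (m j : Int) (q : PySem.Set Int) : PySem.Set Int :=
  q.foldl (fun q2 i =>
    ([i - 1, i, i + 1]).foldl (fun q2 i2 =>
      if 0 ≤ i2 ∧ i2 < m ∧ pvCell grid i (j - 1) < pvCell grid i2 j
      then PySem.Set.add q2 i2 else q2) q2)
    PySem.Set.empty

-- for j in range(1, n): q = q2; if not q: return j - 1 / after the loop: return n - 1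
def pvALoop (grid : List (List Int)) (m n : Int) (q : PySem.Set Int) (j : Int) : Int :=
  if _h : j < n then
    if pvAStep grid m j q = ([] : PySem.Set Int) then j - 1
    else pvALoop grid m n (pvAStep grid m j q) (j + 1)
  else n - 1
termination_by (n - j).toNat
decreasing_by omega

-- m, n = len(grid), len(grid[0]); q = set(range(m))
def maxMoves2 (grid : List (List Int)) : Int :=
  pvALoop grid (grid.length : Int) (((PySem.List.pyGet? grid 0).getD []).length : Int)
    (PySem.Set.ofList (PySem.List.pyRange 0 (grid.length : Int) 1)) 1

-- ===== PORT B =====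
-- best = -1; for i2 in (i-1, i, i+1): if 0 <= i2 < m and grid[i][j] < grid[i2][j+1] and f[i2] > best: best = f[i2]
def pvBBest (grid : List (List Int)) (f : List Int) (m j i : Int) : Int :=
  ([i - 1, i, i + 1]).foldl (fun best i2 =>
    if (0 ≤ i2 ∧ i2 < m ∧ pvCell grid i j < pvCell grid i2 (j + 1)) ∧
        best < (PySem.List.pyGet? f i2).getD 0
    then (PySem.List.pyGet? f i2).getD 0 else best) (-1)

-- nf = []; for i in range(m): nf.append(best + 1)
def pvBStep (grid : List (List Int)) (m j : Int) (f : List Int) : List Int :=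
  (PySem.List.pyRange 0 m 1).foldl (fun nf i => nf ++ [pvBBest grid f m j i + 1]) []

-- m, n = len(grid), len(grid[0]); f = [0]*m; for j in reversed(range(n-1)): f = nf; return max(f)
def maxMoves2_alt (grid : List (List Int)) : Int :=
  (PySem.List.max?
    (((PySem.List.pyRange 0 ((((PySem.List.pyGet? grid 0).getD []).length : Int) - 1) 1).reverse).foldl
      (fun f j => pvBStep grid (grid.length : Int) j f)
      (List.replicate (grid.length : Int).toNat 0))
    (fun x => x)).getD 0

-- ===== PRECONDITION & SPEC =====
-- Pre_ excludes: the empty grid (both versions raise IndexError); grids whose first row is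
-- empty (zero columns — A returns the artefact n-1 = -1 while B returns 0, a degenerate
-- corner neither value of which anyone would specify); and ragged grids with a row shorter
-- than the first when n = len(grid[0]) ≥ 2 (B reads every cell of the first n columns and
-- raises IndexError there, while A may happen to return when its frontier dies before
-- touching a missing cell; with n ≤ 1 neither program reads any cell, so ragged rows are
-- admitted there).
def Pre_maxMoves2 (grid : List (List Int)) : Prop :=
  grid ≠ [] ∧ grid.headD [] ≠ [] ∧
    ((grid.headD []).length ≤ 1 ∨ ∀ row ∈ grid, (grid.headD []).length ≤ row.length)
instance (grid : List (List Int)) : Decidable (Pre_maxMoves2 grid) := by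
  unfold Pre_maxMoves2; infer_instance

def pvWitness_maxMoves2 : List (List Int) := [[1, 2], [3, 4]]

def Spec_maxMoves2 (grid : List (List Int)) (out : Int) : Prop := out = maxMoves2_alt grid
instance (grid : List (List Int)) (out : Int) : Decidable (Spec_maxMoves2 grid out) := by
  unfold Spec_maxMoves2; infer_instance

-- ===== CLAIM (what is proved, stated in full; the proofs are below) =====
def Claim_equal_maxMoves2 : Prop :=
  ∀ (grid : List (List Int)), Dom_maxMoves2 grid → Pre_maxMoves2 grid →
    Spec_maxMoves2 grid (maxMoves2 grid)

-- ===== LEMMAS AND PROOFS =====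

-- the DP vector for column j: entry i = longest rightward path length from cell (i, j)
def pvVecAt (grid : List (List Int)) (m n j : Int) : List Int :=
  if _h : j < n - 1 then pvBStep grid m j (pvVecAt grid m n (j + 1))
  else List.replicate m.toNat 0
termination_by (n - 1 - j).toNat
decreasing_by omega

def pvFval (grid : List (List Int)) (m n i j : Int) : Int :=
  (PySem.List.pyGet? (pvVecAt grid m n j) i).getD 0

def pvEdge (grid : List (List Int)) (m j i i2 : Int) : Prop :=
  0 ≤ i2 ∧ i2 < m ∧ pvCell grid i j < pvCell grid i2 (j + 1)

def pvIsMax (l : List Int) (v : Int → Int) (r : Int) : Prop :=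
  (∃ i ∈ l, r = v i) ∧ ∀ i ∈ l, v i ≤ r

theorem pvIsMax_exists (l : List Int) (v : Int → Int) (h : l ≠ []) : ∃ r, pvIsMax l v r := by
  induction l with
  | nil => exact absurd rfl h
  | cons a t ih =>
    cases t with
    | nil => exact ⟨v a, ⟨a, by simp⟩, by simp⟩
    | cons b u =>
      obtain ⟨r, ⟨i, hi, hr⟩, hub⟩ := ih (by simp)
      refine ⟨max r (v a), ?_, ?_⟩
      · rcases le_total r (v a) with hle | hle
        · exact ⟨a, by simp, by omega⟩
        · exact ⟨i, by simp [hi], by omega⟩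
      · intro i hi'
        rcases List.mem_cons.mp hi' with rfl | hi'
        · omega
        · have := hub i hi'; omega

theorem pvIsMax_unique {l : List Int} {v : Int → Int} {r r' : Int}
    (h1 : pvIsMax l v r) (h2 : pvIsMax l v r') : r = r' := by
  obtain ⟨⟨i, hi, hr⟩, hub⟩ := h1
  obtain ⟨⟨i', hi', hr'⟩, hub'⟩ := h2
  have := hub i' hi'
  have := hub' i hi
  omega

theorem pvIsMax_congr {l l' : List Int} {v : Int → Int} {r : Int}
    (hm : ∀ x, x ∈ l ↔ x ∈ l') (h : pvIsMax l v r) : pvIsMax l' v r := by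
  obtain ⟨⟨i, hi, hr⟩, hub⟩ := h
  exact ⟨⟨i, (hm i).mp hi, hr⟩, fun i hi' => hub i ((hm i).mpr hi')⟩

-- generic characterisation of the running-max fold in pvBBest
theorem foldBest_spec (v : Int → Int) (Q : Int → Prop) [DecidablePred Q]
    (l : List Int) (b : Int) :
    b ≤ (l.foldl (fun b i2 => if Q i2 ∧ b < v i2 then v i2 else b) b) ∧
    ((l.foldl (fun b i2 => if Q i2 ∧ b < v i2 then v i2 else b) b) = b ∨
      ∃ i2 ∈ l, Q i2 ∧ (l.foldl (fun b i2 => if Q i2 ∧ b < v i2 then v i2 else b) b) = v i2) ∧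
    (∀ i2 ∈ l, Q i2 → v i2 ≤ (l.foldl (fun b i2 => if Q i2 ∧ b < v i2 then v i2 else b) b)) := by
  induction l generalizing b with
  | nil => simp
  | cons a t ih =>
    simp only [List.foldl_cons]
    set b' := if Q a ∧ b < v a then v a else b with hb'
    have hbb' : b ≤ b' := by rw [hb']; split_ifs with h' <;> omega
    have hav : Q a → v a ≤ b' := by
      intro hQ; rw [hb']
      split_ifs with h' <;> [omega; exact le_of_not_gt (fun hlt => h' ⟨hQ, hlt⟩)]
    obtain ⟨h1, h2, h3⟩ := ih b'
    refine ⟨le_trans hbb' h1, ?_, ?_⟩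
    · rcases h2 with h2 | ⟨i2, hi2, hQ2, he2⟩
      · rw [h2, hb']
        split_ifs with h'
        · exact Or.inr ⟨a, by simp, h'.1, rfl⟩
        · exact Or.inl rfl
      · exact Or.inr ⟨i2, by simp [hi2], hQ2, he2⟩
    · intro i2 hi2 hQ2
      rcases List.mem_cons.mp hi2 with rfl | hi2
      · exact le_trans (hav hQ2) h1
      · exact h3 i2 hi2 hQ2

theorem pvBBest_spec (grid : List (List Int)) (f : List Int) (m j i : Int) :
    -1 ≤ pvBBest grid f m j i ∧
    (pvBBest grid f m j i = -1 ∨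
      ∃ i2 ∈ [i - 1, i, i + 1], pvEdge grid m j i i2 ∧
        pvBBest grid f m j i = (PySem.List.pyGet? f i2).getD 0) ∧
    (∀ i2 ∈ [i - 1, i, i + 1], pvEdge grid m j i i2 →
      (PySem.List.pyGet? f i2).getD 0 ≤ pvBBest grid f m j i) := by
  have h := foldBest_spec (fun i2 => (PySem.List.pyGet? f i2).getD 0)
    (fun i2 => 0 ≤ i2 ∧ i2 < m ∧ pvCell grid i j < pvCell grid i2 (j + 1))
    [i - 1, i, i + 1] (-1)
  exact h

theorem pvBStep_eq_map (grid : List (List Int)) (m j : Int) (f : List Int) :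
    pvBStep grid m j f = (PySem.List.pyRange 0 m 1).map (fun i => pvBBest grid f m j i + 1) := by
  unfold pvBStep
  simp only [PySem.List.foldl_append_singleton_eq_map]
  induction (PySem.List.pyRange 0 m 1) with
  | nil => rfl
  | cons a t ih => simp_all

theorem length_pvVecAt (grid : List (List Int)) (m n j : Int) :
    (pvVecAt grid m n j).length = m.toNat := by
  rw [pvVecAt]
  split_ifs
  · rw [pvBStep_eq_map, List.length_map, PySem.List.length_pyRange_one]; omega
  · exact List.length_replicate

theorem pvFval_step (grid : List (List Int)) (m n i j : Int)
    (hi0 : 0 ≤ i) (him : i < m) (hj : j < n - 1) :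
    pvFval grid m n i j = pvBBest grid (pvVecAt grid m n (j + 1)) m j i + 1 := by
  unfold pvFval
  rw [pvVecAt, dif_pos hj, pvBStep_eq_map, PySem.List.pyGet?_of_nonneg _ hi0]
  have hm' : ((m.toNat : Int)) = m := Int.toNat_of_nonneg (by omega)
  rw [← hm', PySem.List.getElem?_map_pyRange_zero _ m.toNat i.toNat (by omega)]
  simp [Int.toNat_of_nonneg hi0, hm']

theorem pvFval_base (grid : List (List Int)) (m n i j : Int) (hj : ¬ j < n - 1) :
    pvFval grid m n i j = 0 := by
  unfold pvFval
  rw [pvVecAt, dif_neg hj]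
  cases h : PySem.List.pyGet? (List.replicate m.toNat (0 : Int)) i with
  | none => simp
  | some x =>
    have hx := PySem.List.mem_of_pyGet?_eq_some _ h
    simp [List.eq_of_mem_replicate hx]

theorem pvFval_nonneg (grid : List (List Int)) (m n i j : Int) :
    0 ≤ pvFval grid m n i j := by
  unfold pvFval
  cases h : PySem.List.pyGet? (pvVecAt grid m n j) i with
  | none => simp
  | some x =>
    have hx := PySem.List.mem_of_pyGet?_eq_some _ h
    rw [pvVecAt] at hx
    split_ifs at hx
    · rw [pvBStep_eq_map] at hx
      obtain ⟨i', _, rfl⟩ := List.mem_map.mp hx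
      have := (pvBBest_spec grid (pvVecAt grid m n (j + 1)) m j i').1
      simp; omega
    · simp [List.eq_of_mem_replicate hx]

-- recurrence, upper-bound direction
theorem pvFval_gt (grid : List (List Int)) (m n i i2 j : Int)
    (hi0 : 0 ≤ i) (him : i < m) (hj : j < n - 1)
    (hmem : i2 ∈ [i - 1, i, i + 1]) (he : pvEdge grid m j i i2) :
    pvFval grid m n i2 (j + 1) < pvFval grid m n i j := by
  have hs := pvFval_step grid m n i j hi0 him hj
  have hub := (pvBBest_spec grid (pvVecAt grid m n (j + 1)) m j i).2.2 i2 hmem he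
  unfold pvFval
  unfold pvFval at hs
  omega

-- recurrence, attainment direction
theorem pvFval_cases (grid : List (List Int)) (m n i j : Int)
    (hi0 : 0 ≤ i) (him : i < m) (hj : j < n - 1) :
    pvFval grid m n i j = 0 ∨
      ∃ i2 ∈ [i - 1, i, i + 1], pvEdge grid m j i i2 ∧
        pvFval grid m n i j = pvFval grid m n i2 (j + 1) + 1 := by
  have hs := pvFval_step grid m n i j hi0 him hj
  rcases (pvBBest_spec grid (pvVecAt grid m n (j + 1)) m j i).2.1 with h0 | ⟨i2, hm2, he, heq⟩
  · left; omega
  · right; exact ⟨i2, hm2, he, by unfold pvFval; unfold pvFval at hs; omega⟩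

-- membership in the accumulating set fold
theorem mem_addFold (P : Int → Prop) [DecidablePred P] :
    ∀ (l : List Int) (s : PySem.Set Int) (x : Int),
      x ∈ l.foldl (fun s i2 => if P i2 then PySem.Set.add s i2 else s) s ↔
        x ∈ s ∨ (x ∈ l ∧ P x) := by
  intro l
  induction l with
  | nil => simp
  | cons a t ih =>
    intro s x
    simp only [List.foldl_cons]
    rw [ih]
    by_cases hPa : P a
    · rw [if_pos hPa, PySem.Set.mem_add]
      constructor
      · rintro ((h | rfl) | h)
        · exact Or.inl h
        · exact Or.inr ⟨by simp, hPa⟩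
        · exact Or.inr ⟨by simp [h.1], h.2⟩
      · rintro (h | ⟨hm, hP⟩)
        · exact Or.inl (Or.inl h)
        · rcases List.mem_cons.mp hm with rfl | hm
          · exact Or.inl (Or.inr rfl)
          · exact Or.inr ⟨hm, hP⟩
    · rw [if_neg hPa]
      constructor
      · rintro (h | h)
        · exact Or.inl h
        · exact Or.inr ⟨by simp [h.1], h.2⟩
      · rintro (h | ⟨hm, hP⟩)
        · exact Or.inl h
        · rcases List.mem_cons.mp hm with rfl | hm
          · exact absurd hP hPa
          · exact Or.inr ⟨hm, hP⟩

theorem mem_pvAStepAux (grid : List (List Int)) (m j : Int) :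
    ∀ (l : List Int) (s : PySem.Set Int) (x : Int),
      x ∈ l.foldl (fun q2 i =>
          ([i - 1, i, i + 1]).foldl (fun q2 i2 =>
            if 0 ≤ i2 ∧ i2 < m ∧ pvCell grid i (j - 1) < pvCell grid i2 j
            then PySem.Set.add q2 i2 else q2) q2) s ↔
        x ∈ s ∨ ∃ i ∈ l, x ∈ [i - 1, i, i + 1] ∧ pvEdge grid m (j - 1) i x := by
  intro l
  induction l with
  | nil => simp
  | cons a t ih =>
    intro s x
    rw [List.foldl_cons]
    rw [ih]
    rw [mem_addFold (fun i2 => 0 ≤ i2 ∧ i2 < m ∧ pvCell grid a (j - 1) < pvCell grid i2 j)]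
    have hj1 : j - 1 + 1 = j := by omega
    unfold pvEdge
    rw [hj1]
    constructor
    · rintro ((h | h) | ⟨i, hi, hx⟩)
      · exact Or.inl h
      · exact Or.inr ⟨a, by simp, h⟩
      · exact Or.inr ⟨i, by simp [hi], hx⟩
    · rintro (h | ⟨i, hi, hx⟩)
      · exact Or.inl (Or.inl h)
      · rcases List.mem_cons.mp hi with rfl | hi
        · exact Or.inl (Or.inr hx)
        · exact Or.inr ⟨i, hi, hx⟩

theorem mem_pvAStep (grid : List (List Int)) (m j : Int) (q : PySem.Set Int) (x : Int) :
    x ∈ pvAStep grid m j q ↔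
      ∃ i ∈ q, x ∈ [i - 1, i, i + 1] ∧ pvEdge grid m (j - 1) i x := by
  unfold pvAStep
  rw [mem_pvAStepAux]
  simp [PySem.Set.empty]

-- A's loop returns (j-1) + (max over the frontier of the remaining path length)
theorem pvALoop_eq_aux (grid : List (List Int)) (m n : Int) :
    ∀ (k : Nat) (j : Int) (q : PySem.Set Int) (r : Int), (n - j).toNat ≤ k →
      1 ≤ j → j ≤ n → q ≠ ([] : PySem.Set Int) → (∀ i ∈ q, 0 ≤ i ∧ i < m) →
      pvIsMax q (fun i => pvFval grid m n i (j - 1)) r →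
      pvALoop grid m n q j = (j - 1) + r := by
  intro k
  induction k with
  | zero =>
    intro j q r hk h1 hn _hne _hb hm
    rw [pvALoop, dif_neg (by omega)]
    obtain ⟨⟨i, _hi, hr⟩, _⟩ := hm
    simp only [] at hr
    rw [pvFval_base grid m n i (j - 1) (by omega)] at hr
    omega
  | succ k ih =>
    intro j q r hk h1 hn hne hb hm
    rw [pvALoop]
    by_cases h : j < n
    · rw [dif_pos h]
      by_cases hq2e : pvAStep grid m j q = ([] : PySem.Set Int)
      · rw [if_pos hq2e]
        obtain ⟨⟨i, hi, hr⟩, _⟩ := hm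
        rcases pvFval_cases grid m n i (j - 1) (hb i hi).1 (hb i hi).2 (by omega)
          with h0 | ⟨i2, hm2, he, _⟩
        · simp only [] at hr; omega
        · exfalso
          have hj1 : j - 1 + 1 = j := by omega
          have : i2 ∈ pvAStep grid m j q := by
            rw [mem_pvAStep]
            exact ⟨i, hi, hm2, by rw [← hj1] at he ⊢; exact he⟩
          rw [hq2e] at this
          simp at this
      · rw [if_neg hq2e]
        have hq2b : ∀ x ∈ pvAStep grid m j q, 0 ≤ x ∧ x < m := by
          intro x hx
          obtain ⟨i, _, _, he⟩ := (mem_pvAStep grid m j q x).mp hx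
          exact ⟨he.1, he.2.1⟩
        obtain ⟨r2, hmax2⟩ := pvIsMax_exists (pvAStep grid m j q)
          (fun i => pvFval grid m n i j) hq2e
        have hj1 : j + 1 - 1 = j := by omega
        have hmax2' : pvIsMax (pvAStep grid m j q)
            (fun i => pvFval grid m n i (j + 1 - 1)) r2 := by rw [hj1]; exact hmax2
        have hrec := ih (j + 1) (pvAStep grid m j q) r2 (by omega) (by omega) (by omega)
          hq2e hq2b hmax2'
        rw [hrec]
        have hr2nn : 0 ≤ r2 := by
          obtain ⟨⟨i2, _, hr2⟩, _⟩ := hmax2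
          simp only [] at hr2
          have := pvFval_nonneg grid m n i2 j
          omega
        -- upper bound: every frontier value at column j-1 is ≤ r2 + 1
        have hub : ∀ i ∈ q, pvFval grid m n i (j - 1) ≤ r2 + 1 := by
          intro i hi
          rcases pvFval_cases grid m n i (j - 1) (hb i hi).1 (hb i hi).2 (by omega)
            with h0 | ⟨i2, hm2, he, heq⟩
          · omega
          · have hj2 : j - 1 + 1 = j := by omega
            have hmem2 : i2 ∈ pvAStep grid m j q := by
              rw [mem_pvAStep]; exact ⟨i, hi, hm2, he⟩
            have := hmax2.2 i2 hmem2
            simp only [] at this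
            rw [hj2] at heq
            omega
        have hkey : pvIsMax q (fun i => pvFval grid m n i (j - 1)) (r2 + 1) := by
          constructor
          · obtain ⟨⟨i2s, hi2s, hr2⟩, _⟩ := hmax2
            obtain ⟨i, hi, hmemt, he⟩ := (mem_pvAStep grid m j q i2s).mp hi2s
            refine ⟨i, hi, ?_⟩
            have hgt := pvFval_gt grid m n i i2s (j - 1) (hb i hi).1 (hb i hi).2
              (by omega) hmemt he
            have hj2 : j - 1 + 1 = j := by omega
            rw [hj2] at hgt
            have := hub i hi
            simp only [] at hr2 ⊢
            omega
          · intro i hi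
            exact hub i hi
        have : r = r2 + 1 := pvIsMax_unique hm hkey
        omega
    · rw [dif_neg h]
      obtain ⟨⟨i, _hi, hr⟩, _⟩ := hm
      simp only [] at hr
      rw [pvFval_base grid m n i (j - 1) (by omega)] at hr
      omega

theorem pvALoop_eq (grid : List (List Int)) (m n : Int) (j : Int) (q : PySem.Set Int)
    (r : Int) (h1 : 1 ≤ j) (hn : j ≤ n) (hne : q ≠ ([] : PySem.Set Int))
    (hb : ∀ i ∈ q, 0 ≤ i ∧ i < m)
    (hm : pvIsMax q (fun i => pvFval grid m n i (j - 1)) r) :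
    pvALoop grid m n q j = (j - 1) + r :=
  pvALoop_eq_aux grid m n (n - j).toNat j q r (le_refl _) h1 hn hne hb hm

-- B's fold computes pvVecAt
theorem pvFold_eq_aux (grid : List (List Int)) (m n : Int) :
    ∀ (k : Nat) (j : Int), (n - 1 - j).toNat ≤ k →
      ((PySem.List.pyRange j (n - 1) 1).reverse).foldl
        (fun f j => pvBStep grid m j f) (List.replicate m.toNat 0) = pvVecAt grid m n j := by
  intro k
  induction k with
  | zero =>
    intro j hk
    rw [PySem.List.pyRange_one_eq_nil (by omega), pvVecAt, dif_neg (by omega)]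
    rfl
  | succ k ih =>
    intro j hk
    by_cases h : j < n - 1
    · rw [PySem.List.pyRange_one_cons h, List.reverse_cons, List.foldl_append,
        ih (j + 1) (by omega)]
      conv_rhs => rw [pvVecAt]
      rw [dif_pos h]
      rfl
    · rw [PySem.List.pyRange_one_eq_nil (by omega), pvVecAt, dif_neg (by omega)]
      rfl

theorem pvFold_eq (grid : List (List Int)) (m n : Int) (j : Int) (_hj : 0 ≤ j) :
    ((PySem.List.pyRange j (n - 1) 1).reverse).foldl
      (fun f j => pvBStep grid m j f) (List.replicate m.toNat 0) = pvVecAt grid m n j :=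
  pvFold_eq_aux grid m n (n - 1 - j).toNat j (le_refl _)

-- elements of the DP vector are exactly the pvFval values over the row range
theorem mem_pvVecAt (grid : List (List Int)) (m n j : Int) (hm : 1 ≤ m) (x : Int) :
    x ∈ pvVecAt grid m n j ↔ ∃ i ∈ PySem.List.pyRange 0 m 1, x = pvFval grid m n i j := by
  rw [pvVecAt]
  split_ifs with h
  · rw [pvBStep_eq_map]
    simp only [List.mem_map]
    constructor
    · rintro ⟨i, hi, rfl⟩
      obtain ⟨hi0, him⟩ := PySem.List.mem_pyRange_one.mp hi
      exact ⟨i, hi, by rw [pvFval_step grid m n i j hi0 him h]⟩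
    · rintro ⟨i, hi, rfl⟩
      obtain ⟨hi0, him⟩ := PySem.List.mem_pyRange_one.mp hi
      exact ⟨i, hi, by rw [pvFval_step grid m n i j hi0 him h]⟩
  · constructor
    · intro hx
      refine ⟨0, PySem.List.mem_pyRange_one.mpr ⟨le_refl _, by omega⟩, ?_⟩
      rw [pvFval_base grid m n 0 j h]
      exact List.eq_of_mem_replicate hx
    · rintro ⟨i, _, rfl⟩
      rw [pvFval_base grid m n i j h]
      exact List.mem_replicate.mpr ⟨by omega, rfl⟩

theorem alt_eq (grid : List (List Int)) (r : Int) (hm : 1 ≤ (grid.length : Int))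
    (h : pvIsMax (PySem.List.pyRange 0 (grid.length : Int) 1)
          (fun i => pvFval grid (grid.length : Int)
            (((PySem.List.pyGet? grid 0).getD []).length : Int) i 0) r) :
    maxMoves2_alt grid = r := by
  unfold maxMoves2_alt
  rw [pvFold_eq grid (grid.length : Int) (((PySem.List.pyGet? grid 0).getD []).length : Int)
    0 (le_refl _)]
  set m : Int := (grid.length : Int)
  set n : Int := (((PySem.List.pyGet? grid 0).getD []).length : Int)
  have hlen : (pvVecAt grid m n 0).length = m.toNat := length_pvVecAt grid m n 0
  have hne : pvVecAt grid m n 0 ≠ [] := by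
    intro hnil; rw [hnil] at hlen; simp at hlen; omega
  cases hmx : PySem.List.max? (pvVecAt grid m n 0) (fun x => x) with
  | none => exact absurd ((PySem.List.max?_eq_none_iff _ _).mp hmx) hne
  | some mx =>
    simp only [Option.getD_some]
    have hmem := PySem.List.max?_mem hmx
    have hub := PySem.List.max?_isMax hmx
    have hmx_isMax : pvIsMax (PySem.List.pyRange 0 m 1) (fun i => pvFval grid m n i 0) mx := by
      constructor
      · exact (mem_pvVecAt grid m n 0 hm mx).mp hmem
      · intro i hi
        exact hub _ ((mem_pvVecAt grid m n 0 hm (pvFval grid m n i 0)).mpr ⟨i, hi, rfl⟩)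
    exact pvIsMax_unique hmx_isMax h

-- ===== VERDICT (by name: the statement is the Claim_ definition above) =====
theorem maxMoves2_spec : Claim_equal_maxMoves2 := by
  intro grid _hdom hpre
  obtain ⟨hne, hrow0, _hrect⟩ := hpre
  unfold Spec_maxMoves2
  set m : Int := (grid.length : Int) with hmdef
  set n : Int := (((PySem.List.pyGet? grid 0).getD []).length : Int) with hndef
  have hm : 1 ≤ m := by
    have := List.length_pos_iff.mpr hne
    omega
  have hn : 1 ≤ n := by
    cases grid with
    | nil => exact absurd rfl hne
    | cons a t =>
      have : a ≠ [] := hrow0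
      have := List.length_pos_iff.mpr this
      simp only [hndef, PySem.List.pyGet?_zero_cons, Option.getD_some]
      omega
  have h0mem : (0 : Int) ∈ PySem.Set.ofList (PySem.List.pyRange 0 m 1) := by
    rw [PySem.Set.mem_ofList]
    exact PySem.List.mem_pyRange_one.mpr ⟨le_refl _, by omega⟩
  have hq0ne : PySem.Set.ofList (PySem.List.pyRange 0 m 1) ≠ ([] : PySem.Set Int) :=
    List.ne_nil_of_mem h0mem
  obtain ⟨r, hr⟩ := pvIsMax_exists (PySem.Set.ofList (PySem.List.pyRange 0 m 1))
    (fun i => pvFval grid m n i 0) hq0ne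
  have h10 : (1 : Int) - 1 = 0 := by omega
  have hr' : pvIsMax (PySem.Set.ofList (PySem.List.pyRange 0 m 1))
      (fun i => pvFval grid m n i ((1 : Int) - 1)) r := by rw [h10]; exact hr
  have hb : ∀ i ∈ PySem.Set.ofList (PySem.List.pyRange 0 m 1), 0 ≤ i ∧ i < m := by
    intro i hi
    rw [PySem.Set.mem_ofList] at hi
    exact PySem.List.mem_pyRange_one.mp hi
  have hA : maxMoves2 grid = (1 - 1) + r := by
    unfold maxMoves2
    exact pvALoop_eq grid m n 1 _ r (le_refl _) hn hq0ne hb hr'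
  have hB : maxMoves2_alt grid = r :=
    alt_eq grid r hm (pvIsMax_congr (fun x => PySem.Set.mem_ofList _ _) hr)
  rw [hA, hB]
  omega
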